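-- pv_equiv track=rewrite | github.com/dongbinghua/Hub | hub/util/compress_ranges.py | compress_indexes_into_ranges
-- ===== SOURCE A (Python) =====
-- from typing import List
--
-- def compress_indexes_into_ranges(indexes: List[int]):
--     # compress indexes into ranges
--     ranges = []
--     start = indexes[0]
--     end = indexes[0]
--     for index in indexes[1:]:
--         if index == end + 1:
--             end = index
--         else:
--             ranges.append((start, end))
--             start = index
--             end = index
--
--     ranges.append((start, end))
--     return ranges
-- ===== SOURCE B (Python) =====
-- from typing import List
--
-- def compress_indexes_into_ranges(indexes: List[int]):
--     # a value starts a range iff it does not continue its predecessor, and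
--     # ends one iff its successor does not continue it: pair gap boundaries up
--     gaps = [(a, b) for a, b in zip(indexes, indexes[1:]) if b != a + 1]
--     starts = [indexes[0]] + [b for _, b in gaps]
--     ends = [a for a, _ in gaps] + [indexes[-1]]
--     return list(zip(starts, ends))
-- ===== Notes on version B (the rewrite author's own statement) =====
-- stated objective: alternative
-- what changed: Replaces A's stateful accumulator loop by a declarative zip-of-adjacent-pairs computation: gap boundaries are collected once, range starts and ends are built as two lists and zipped together.
import Mathlib
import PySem

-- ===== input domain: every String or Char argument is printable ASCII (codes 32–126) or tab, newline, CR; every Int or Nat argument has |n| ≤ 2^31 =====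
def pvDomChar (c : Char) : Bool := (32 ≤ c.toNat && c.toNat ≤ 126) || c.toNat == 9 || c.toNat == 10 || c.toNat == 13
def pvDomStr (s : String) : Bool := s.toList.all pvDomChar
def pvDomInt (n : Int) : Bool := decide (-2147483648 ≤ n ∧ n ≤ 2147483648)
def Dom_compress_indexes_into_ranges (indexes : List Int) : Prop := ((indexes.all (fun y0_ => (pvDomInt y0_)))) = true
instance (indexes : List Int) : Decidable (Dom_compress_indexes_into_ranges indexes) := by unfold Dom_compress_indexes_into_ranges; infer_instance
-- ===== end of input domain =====

-- B replaces A's stateful accumulator loop by zipping gap boundaries into (start, end) pairs; alternative decomposition, same O(n) cost.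


-- ===== PORT A =====
-- the for-loop over indexes[1:] with state (ranges, start, end)
def pvALoop (rest : List Int) (ranges : List (Int × Int)) (start e : Int) : List (Int × Int) :=
  match rest with
  | [] => ranges ++ [(start, e)]
  | i :: rest' =>
      if i = e + 1 then pvALoop rest' ranges start i
      else pvALoop rest' (ranges ++ [(start, e)]) i i

def compress_indexes_into_ranges (indexes : List Int) : List (Int × Int) :=
  match PySem.List.pyGet? indexes 0 with
  | none => []  -- indexes[0] raises IndexError on []; excluded by Pre_
  | some s => pvALoop (PySem.List.slice indexes (some 1) none) [] s s

-- ===== PORT B =====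
def compress_indexes_into_ranges_alt (indexes : List Int) : List (Int × Int) :=
  let gaps := (indexes.zip (PySem.List.slice indexes (some 1) none)).filter
      (fun ab => !(ab.2 == ab.1 + 1))
  match PySem.List.pyGet? indexes 0, PySem.List.pyGet? indexes (-1) with
  | some first, some last =>
      let starts := first :: gaps.map (fun g => g.2)
      let ends := gaps.map (fun g => g.1) ++ [last]
      starts.zip ends
  | _, _ => []  -- indexes[0] / indexes[-1] raise IndexError on []; excluded by Pre_

-- ===== PRECONDITION & SPEC =====
-- A (and B) raise IndexError on the empty list (indexes[0]); Pre_ excludes exactly that input.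
def Pre_compress_indexes_into_ranges (indexes : List Int) : Prop := indexes ≠ []
instance (indexes : List Int) : Decidable (Pre_compress_indexes_into_ranges indexes) := by unfold Pre_compress_indexes_into_ranges; infer_instance
def pvWitness_compress_indexes_into_ranges : List Int := [1, 2, 3, 7, 9, 10]

def Spec_compress_indexes_into_ranges (indexes : List Int) (out : List (Int × Int)) : Prop := out = compress_indexes_into_ranges_alt indexes
instance (indexes : List Int) (out : List (Int × Int)) : Decidable (Spec_compress_indexes_into_ranges indexes out) := by unfold Spec_compress_indexes_into_ranges; infer_instance

-- ===== CLAIM (what is proved, stated in full; the proofs are below) =====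
def Claim_equal_compress_indexes_into_ranges : Prop := ∀ (indexes : List Int), Dom_compress_indexes_into_ranges indexes → Pre_compress_indexes_into_ranges indexes → Spec_compress_indexes_into_ranges indexes (compress_indexes_into_ranges indexes)

-- ===== LEMMAS AND PROOFS =====

-- reference shape both ports are reduced to
def pvRef (s e : Int) : List Int → List (Int × Int)
  | [] => [(s, e)]
  | i :: r => if i = e + 1 then pvRef s i r else (s, e) :: pvRef i i r

-- the filtered adjacent pairs, recursively
def pvGaps (e : Int) : List Int → List (Int × Int)
  | [] => []
  | i :: r => if i = e + 1 then pvGaps i r else (e, i) :: pvGaps i r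

theorem pvALoop_eq (t : List Int) (ranges : List (Int × Int)) (s e : Int) :
    pvALoop t ranges s e = ranges ++ pvRef s e t := by
  induction t generalizing ranges s e with
  | nil => simp [pvALoop, pvRef]
  | cons i r ih =>
      simp only [pvALoop, pvRef]
      split_ifs with h
      · exact ih ranges s i
      · rw [ih (ranges ++ [(s, e)]) i i, List.append_assoc]; rfl

theorem pvGaps_eq (t : List Int) (x : Int) :
    ((x :: t).zip t).filter (fun ab => !(ab.2 == ab.1 + 1)) = pvGaps x t := by
  induction t generalizing x with
  | nil => rfl
  | cons i r ih =>
      simp only [List.zip_cons_cons, List.filter_cons, pvGaps]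
      by_cases h : i = x + 1
      · subst h; simpa using ih (x + 1)
      · simp [h, ih i]

theorem pvMain (t : List Int) (s e : Int) :
    (s :: (pvGaps e t).map (fun g => g.2)).zip
      ((pvGaps e t).map (fun g => g.1) ++ [t.getLastD e]) = pvRef s e t := by
  induction t generalizing s e with
  | nil => rfl
  | cons i r ih =>
      simp only [pvGaps, pvRef, List.getLastD_cons]
      split_ifs with h
      · exact ih s i
      · simp only [List.map_cons, List.cons_append, List.zip_cons_cons]
        rw [ih i i]

theorem pvGetLast? (x : Int) (t : List Int) :
    (x :: t).getLast? = some (t.getLastD x) := by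
  induction t generalizing x with
  | nil => rfl
  | cons b r ih => simp only [List.getLast?_cons_cons, List.getLastD_cons]; exact ih b

theorem compress_indexes_into_ranges_spec : Claim_equal_compress_indexes_into_ranges := by
  intro indexes _ hpre
  unfold Spec_compress_indexes_into_ranges
  match indexes with
  | [] => exact absurd rfl hpre
  | x :: t =>
      unfold compress_indexes_into_ranges compress_indexes_into_ranges_alt
      rw [PySem.List.slice_from_one]
      simp only [PySem.List.pyGet?_zero_cons, PySem.List.pyGet?_neg_one, List.tail_cons]
      rw [pvGetLast? x t]
      simp only []
      rw [pvGaps_eq t x, pvALoop_eq, pvMain]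
      rfl
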